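-- pv_equiv track=rewrite | github.com/walshification/dsap | ch04/creativity/c_4_15.py | puzzle_solve
-- ===== SOURCE A (Python) =====
-- from typing import List, Set
--
-- def puzzle_solve(k: int, sequence: List[str], U: Set[str]) -> List[str]:
--     """
--     Algorithm PuzzleSolve(k, S, U):
--         Input: An integer k, sequence S, and set U
--         Output: An enumeration of all k-length extensions to S using elements in U
--             without repetitions.
--
--         for each e in U do
--             Add e to the end of S
--             Remove e from U
--             if k == 1 then
--                 Test whether S is a configuration that solves the puzzle
--                 If S solves the puzzle then
--                     return "Solution found: " S
--             else
--                 PuzzleSolve(k - 1, S, U)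
--             Remove e from the end of S
--             Add e back to U
--     """
--     answers = []
--     universe = U.copy()  # Avoid altering the set during iteration. O(n) unfortunately.
--     for element in U:
--         sequence.append(element)
--         universe.remove(element)
--
--         if k == 1:
--             answers.append("".join(sequence))
--         else:
--             answers += puzzle_solve(k - 1, sequence, universe)
--
--         universe.add(sequence.pop())
--
--     return answers
-- ===== SOURCE B (Python) =====
-- import itertools
--
--
-- def puzzle_solve(k, sequence, U):
--     if k < 1 or k > len(U):
--         return []
--     prefix = "".join(sequence)
--     return [prefix + "".join(p) for p in itertools.permutations(U, k)]
-- ===== Notes on version B (the rewrite author's own statement) =====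
-- stated objective: idiomatic
-- what changed: Replaced the hand-rolled backtracking recursion with mutable sequence/universe state by a single comprehension over itertools.permutations(U, k) with the prefix joined once, guarded by k < 1 or k > len(U) where no k-permutations exist.
import Mathlib
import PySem

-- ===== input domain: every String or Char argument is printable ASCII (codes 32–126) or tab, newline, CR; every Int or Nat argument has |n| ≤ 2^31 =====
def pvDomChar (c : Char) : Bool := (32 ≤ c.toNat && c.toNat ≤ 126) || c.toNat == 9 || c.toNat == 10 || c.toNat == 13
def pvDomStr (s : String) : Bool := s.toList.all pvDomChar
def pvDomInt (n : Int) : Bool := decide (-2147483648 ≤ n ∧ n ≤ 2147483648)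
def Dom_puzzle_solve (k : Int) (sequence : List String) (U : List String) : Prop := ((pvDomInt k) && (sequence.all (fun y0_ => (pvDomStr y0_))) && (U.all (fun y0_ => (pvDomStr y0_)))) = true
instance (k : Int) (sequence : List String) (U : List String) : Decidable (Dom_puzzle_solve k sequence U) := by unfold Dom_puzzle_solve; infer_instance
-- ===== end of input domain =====

-- B replaces A's backtracking recursion (mutating sequence/universe) by one comprehension
-- over itertools-style k-permutations with the prefix joined once; return values only
-- (A's appends/pops on `sequence` cancel out, so the list is unchanged on return).

-- ===== PORT A =====
-- Transliteration of A. `U` holds the distinct elements of the Python set in iteration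
-- order. `universe.remove(element)` followed by re-`add` restores the element to its hash
-- slot in CPython, so the universe each recursive call sees is `U.erase element` (exact on
-- Nodup `U`, which Pre_ states). `sequence.append`/`pop` become `sequence ++ [element]`.
def puzzle_solve (k : Int) (sequence : List String) (U : List String) : List String :=
  U.attach.foldl
    (fun answers e =>
      answers ++
        (if k = 1 then [PySem.Str.join "" (sequence ++ [e.1])]
         else puzzle_solve (k - 1) (sequence ++ [e.1]) (U.erase e.1)))
    []
termination_by U.length
decreasing_by
  have := List.length_erase_of_mem e.2
  have : (U.erase e.1).length < U.length := by
    have hpos : 0 < U.length := List.length_pos_of_mem e.2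
    omega
  exact this

-- ===== PORT B =====
-- Transliteration of Source B: guard, prefix joined once, map over itertools.permutations(U, k);
-- 'prefix + "".join(p)' is string concatenation, done on the char lists (exact).
def puzzle_solve_alt (k : Int) (sequence : List String) (U : List String) : List String :=
  if k < 1 ∨ (U.length : Int) < k then []
  else
    let pre := PySem.Str.join "" sequence
    (PySem.List.permutations U k.toNat).map
      (fun p => String.ofList (pre.toList ++ (PySem.Str.join "" p).toList))

-- ===== PRECONDITION & SPEC =====
-- Pre_ only states the type convention for U's Python type set[str]: the list holds the
-- set's DISTINCT elements, so lists with duplicates denote no Python input at all.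
def Pre_puzzle_solve (k : Int) (sequence : List String) (U : List String) : Prop :=
  U.Nodup
instance (k : Int) (sequence : List String) (U : List String) : Decidable (Pre_puzzle_solve k sequence U) := by unfold Pre_puzzle_solve; infer_instance

def pvWitness_puzzle_solve : Int × List String × List String := (2, ["S0 "], ["a", "b", "c"])

def Spec_puzzle_solve (k : Int) (sequence : List String) (U : List String) (out : List String) : Prop := out = puzzle_solve_alt k sequence U
instance (k : Int) (sequence : List String) (U : List String) (out : List String) : Decidable (Spec_puzzle_solve k sequence U out) := by unfold Spec_puzzle_solve; infer_instance

-- ===== CLAIM (what is proved, stated in full; the proofs are below) =====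
def Claim_equal_puzzle_solve : Prop := ∀ (k : Int) (sequence : List String) (U : List String), Dom_puzzle_solve k sequence U → Pre_puzzle_solve k sequence U → Spec_puzzle_solve k sequence U (puzzle_solve k sequence U)

-- ===== LEMMAS AND PROOFS =====

-- "".join is List.intercalate with empty separator, i.e. flatten.
theorem intercalate_nil_eq_flatten (l : List (List Char)) :
    List.intercalate [] l = l.flatten := by
  induction l with
  | nil => rfl
  | cons x xs ih =>
    cases xs with
    | nil => simp [List.intercalate]
    | cons y ys =>
      rw [show List.intercalate ([] : List Char) (x :: y :: ys)
            = x ++ [] ++ List.intercalate [] (y :: ys) from by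
        simp [List.intercalate, List.intersperse]]
      simp_all

-- "".join distributes over list append (char-level).
theorem join_empty_append (a b : List String) :
    PySem.Str.join "" (a ++ b) =
      String.ofList ((PySem.Str.join "" a).toList ++ (PySem.Str.join "" b).toList) := by
  simp [PySem.Str.join, PySem.Chars.join, intercalate_nil_eq_flatten, String.toList_ofList]

-- A's loop, written as one flatMap over U.
theorem puzzle_solve_eq_flatMap (k : Int) (sequence : List String) (U : List String) :
    puzzle_solve k sequence U =
      U.flatMap (fun e =>
        if k = 1 then [PySem.Str.join "" (sequence ++ [e])]
        else puzzle_solve (k - 1) (sequence ++ [e]) (U.erase e)) := by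
  rw [puzzle_solve]
  rw [PySem.List.foldl_append_eq_flatMap
        (fun e : {x // x ∈ U} =>
          if k = 1 then [PySem.Str.join "" (sequence ++ [e.1])]
          else puzzle_solve (k - 1) (sequence ++ [e.1]) (U.erase e.1))]
  simp [List.flatMap_eq_foldl]

-- For k ≤ 0 the recursion peels the universe without ever hitting k == 1: answers stays [].
theorem puzzle_solve_of_nonpos_aux (n : Nat) :
    ∀ (U : List String), U.length ≤ n → ∀ (k : Int), k ≤ 0 → ∀ (sequence : List String),
      puzzle_solve k sequence U = [] := by
  induction n with
  | zero =>
    intro U hU k hk sequence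
    have : U = [] := List.length_eq_zero_iff.mp (Nat.le_zero.mp hU)
    rw [puzzle_solve_eq_flatMap, this, List.flatMap_nil]
  | succ n ih =>
    intro U hU k hk sequence
    rw [puzzle_solve_eq_flatMap]
    rw [List.flatMap_eq_nil_iff.mpr]
    intro e he
    rw [if_neg (by omega)]
    have hlen : (U.erase e).length < U.length := by
      have := List.length_erase_of_mem he
      have := List.length_pos_of_mem he
      omega
    exact ih (U.erase e) (by omega) (k - 1) (by omega) (sequence ++ [e])

theorem puzzle_solve_of_nonpos (k : Int) (sequence : List String) (U : List String)
    (hk : k ≤ 0) : puzzle_solve k sequence U = [] :=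
  puzzle_solve_of_nonpos_aux U.length U (le_refl _) k hk sequence

-- Index-based flatMap over a list equals the element-based one.
theorem flatMap_range_getElem {α β : Type} (U : List α) (g : α → List β) :
    (List.range U.length).flatMap (fun i => (U[i]?.map g).getD []) = U.flatMap g := by
  induction U with
  | nil => rfl
  | cons x xs ih =>
    rw [List.length_cons, List.range_succ_eq_map, List.flatMap_cons, List.flatMap_map]
    simp only [List.getElem?_cons_zero, List.getElem?_cons_succ, Option.map_some, Option.getD_some]
    rw [List.flatMap_cons, ih]

-- itertools' index-based recursion step, on a duplicate-free pool.
theorem permutations_succ_of_nodup (U : List String) (h : U.Nodup) (r : Nat) :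
    PySem.List.permutations U (r + 1) =
      U.flatMap (fun e => (PySem.List.permutations (U.erase e) r).map (e :: ·)) := by
  rw [PySem.List.permutations]
  rw [← flatMap_range_getElem U (fun e => (PySem.List.permutations (U.erase e) r).map (e :: ·))]
  apply List.flatMap_congr
  intro i hi
  have hi' : i < U.length := List.mem_range.mp hi
  rw [List.getElem?_eq_getElem hi']
  simp only [Option.map_some, Option.getD_some]
  rw [List.Nodup.erase_getElem h i hi']

-- Main invariant: for k = n+1 ≥ 1, A enumerates exactly B's permutations, joined.
theorem puzzle_solve_pos (n : Nat) :
    ∀ (U : List String), U.Nodup → ∀ (sequence : List String),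
      puzzle_solve ((n : Int) + 1) sequence U =
        (PySem.List.permutations U (n + 1)).map
          (fun p => PySem.Str.join "" (sequence ++ p)) := by
  induction n with
  | zero =>
    intro U h sequence
    rw [puzzle_solve_eq_flatMap, permutations_succ_of_nodup U h 0, List.map_flatMap]
    apply List.flatMap_congr
    intro e he
    norm_num [PySem.List.permutations]
  | succ m ih =>
    intro U h sequence
    rw [puzzle_solve_eq_flatMap, permutations_succ_of_nodup U h (m + 1), List.map_flatMap]
    apply List.flatMap_congr
    intro e he
    rw [if_neg (by push_cast; omega)]
    rw [show ((((m : Nat) + 1 : Nat) : Int) + 1) - 1 = ((m : Nat) : Int) + 1 by push_cast; ring]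
    rw [ih (U.erase e) (h.erase e) (sequence ++ [e]), List.map_map]
    apply List.map_congr_left
    intro p _
    rw [List.append_assoc, List.singleton_append]
    rfl

-- No r-permutations of a pool shorter than r.
theorem permutations_eq_nil_of_short (r : Nat) :
    ∀ (U : List String), U.length < r → PySem.List.permutations U r = [] := by
  induction r with
  | zero => intro U h; omega
  | succ s ih =>
    intro U h
    rw [PySem.List.permutations]
    rw [List.flatMap_eq_nil_iff.mpr]
    intro i hi
    have hi' : i < U.length := List.mem_range.mp hi
    rw [List.getElem?_eq_getElem hi']
    have : (U.eraseIdx i).length < s := by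
      rw [List.length_eraseIdx_of_lt hi']; omega
    rw [ih (U.eraseIdx i) this]
    rfl

-- ===== VERDICT (by name: the statement is the Claim_ definition above) =====
theorem puzzle_solve_spec : Claim_equal_puzzle_solve := by
  intro k sequence U _ hpre
  unfold Spec_puzzle_solve puzzle_solve_alt
  by_cases hk : k < 1
  · rw [if_pos (Or.inl hk), puzzle_solve_of_nonpos k sequence U (by omega)]
  · have hn : k = ((k.toNat - 1 : Nat) : Int) + 1 := by omega
    have hnn : k.toNat = (k.toNat - 1) + 1 := by omega
    by_cases hlen : (U.length : Int) < k
    · rw [if_pos (Or.inr hlen), hn, puzzle_solve_pos (k.toNat - 1) U hpre sequence]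
      rw [permutations_eq_nil_of_short ((k.toNat - 1) + 1) U (by omega), List.map_nil]
    · rw [if_neg (by omega)]
      rw [hn, puzzle_solve_pos (k.toNat - 1) U hpre sequence]
      rw [hnn]
      apply List.map_congr_left
      intro p _
      exact join_empty_append sequence p
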